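-- pv_equiv track=rewrite | github.com/jrenderosrivera-debug/asistente-emocional | app.py | _detectar_conflictos
-- ===== SOURCE A (Python) =====
-- def _detectar_conflictos(emociones):
--     """Detecta conflictos entre emociones opuestas"""
--     pares_opuestos = [
--         {"tristeza", "alegria"},
--         {"ansiedad", "paz"},
--         {"enojo", "calma"},
--         {"miedo", "esperanza"},
--         {"desesperanza", "esperanza"}
--     ]
--
--     emociones_set = set(emociones)
--
--     for par in pares_opuestos:
--         if par.issubset(emociones_set):
--             return True
--
--     return False
-- ===== SOURCE B (Python) =====
-- # B: adjacency map of opposites, one pass over the input with a membership set.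
-- _OPP = {
--     "tristeza": {"alegria"},
--     "alegria": {"tristeza"},
--     "ansiedad": {"paz"},
--     "paz": {"ansiedad"},
--     "enojo": {"calma"},
--     "calma": {"enojo"},
--     "miedo": {"esperanza"},
--     "esperanza": {"miedo", "desesperanza"},
--     "desesperanza": {"esperanza"},
-- }
--
-- def _detectar_conflictos(emociones):
--     """Detecta conflictos entre emociones opuestas"""
--     emociones_set = set(emociones)
--     for e in emociones:
--         if _OPP.get(e, set()) & emociones_set:
--             return True
--     return False
-- ===== Notes on version B (the rewrite author's own statement) =====
-- stated objective: alternative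
-- what changed: Replaces the scan over the fixed list of opposite pairs with issubset tests by a symmetric opposites adjacency dict and a single pass over the input emotions, returning True on the first emotion whose opposite-set intersects the input set.
import Mathlib
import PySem

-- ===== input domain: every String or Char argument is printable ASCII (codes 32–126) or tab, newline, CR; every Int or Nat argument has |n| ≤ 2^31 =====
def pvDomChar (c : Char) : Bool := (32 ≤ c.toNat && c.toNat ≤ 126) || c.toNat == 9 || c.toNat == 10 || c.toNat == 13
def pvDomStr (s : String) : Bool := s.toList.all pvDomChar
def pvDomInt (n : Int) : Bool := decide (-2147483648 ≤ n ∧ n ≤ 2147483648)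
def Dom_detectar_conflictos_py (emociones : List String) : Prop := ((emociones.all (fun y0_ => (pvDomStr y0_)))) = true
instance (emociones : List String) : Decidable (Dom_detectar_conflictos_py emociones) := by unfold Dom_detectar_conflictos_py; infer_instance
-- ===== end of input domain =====

-- B replaces the fixed pair-list scan by an opposites adjacency map and one pass over the input (alternative decomposition, same cost).

-- ===== PORT A =====
def detectar_conflictos_py (emociones : List String) : Bool :=
  let pares_opuestos : List (PySem.Set String) :=
    [PySem.Set.ofList ["tristeza", "alegria"],
     PySem.Set.ofList ["ansiedad", "paz"],
     PySem.Set.ofList ["enojo", "calma"],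
     PySem.Set.ofList ["miedo", "esperanza"],
     PySem.Set.ofList ["desesperanza", "esperanza"]]
  let emociones_set : PySem.Set String := PySem.Set.ofList emociones
  -- 'for par in pares_opuestos: if par.issubset(emociones_set): return True' / 'return False'
  pares_opuestos.any (fun par => PySem.Set.issubset par emociones_set)

-- ===== PORT B =====
-- the module-level adjacency dict _OPP
def pvOpp : PySem.Dict String (PySem.Set String) := PySem.Dict.ofList
  [("tristeza", PySem.Set.ofList ["alegria"]),
   ("alegria", PySem.Set.ofList ["tristeza"]),
   ("ansiedad", PySem.Set.ofList ["paz"]),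
   ("paz", PySem.Set.ofList ["ansiedad"]),
   ("enojo", PySem.Set.ofList ["calma"]),
   ("calma", PySem.Set.ofList ["enojo"]),
   ("miedo", PySem.Set.ofList ["esperanza"]),
   ("esperanza", PySem.Set.ofList ["miedo", "desesperanza"]),
   ("desesperanza", PySem.Set.ofList ["esperanza"])]

def detectar_conflictos_py_alt (emociones : List String) : Bool :=
  let emociones_set : PySem.Set String := PySem.Set.ofList emociones
  -- 'for e in emociones: if _OPP.get(e, set()) & emociones_set: return True' / 'return False'
  emociones.any (fun e =>
    !(PySem.Set.inter (PySem.Dict.getD pvOpp e PySem.Set.empty) emociones_set).isEmpty)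

-- ===== PRECONDITION & SPEC =====
def Spec_detectar_conflictos_py (emociones : List String) (out : Bool) : Prop := out = detectar_conflictos_py_alt emociones
instance (emociones : List String) (out : Bool) : Decidable (Spec_detectar_conflictos_py emociones out) := by unfold Spec_detectar_conflictos_py; infer_instance

-- ===== CLAIM (what is proved, stated in full; the proofs are below) =====
def Claim_equal_detectar_conflictos_py : Prop := ∀ (emociones : List String), Dom_detectar_conflictos_py emociones → Spec_detectar_conflictos_py emociones (detectar_conflictos_py emociones)

-- ===== LEMMAS AND PROOFS =====

-- the common characterisation: some opposite pair is wholly contained in the input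
def pvConf (l : List String) : Prop :=
  ("tristeza" ∈ l ∧ "alegria" ∈ l) ∨ ("ansiedad" ∈ l ∧ "paz" ∈ l) ∨
  ("enojo" ∈ l ∧ "calma" ∈ l) ∨ ("miedo" ∈ l ∧ "esperanza" ∈ l) ∨
  ("desesperanza" ∈ l ∧ "esperanza" ∈ l)

theorem pvA_iff (l : List String) : detectar_conflictos_py l = true ↔ pvConf l := by
  simp [detectar_conflictos_py, pvConf, PySem.Set.issubset_iff, PySem.Set.mem_ofList]

theorem pvOpp_eq : pvOpp = PySem.Dict.mk
    [("tristeza", ["alegria"]), ("alegria", ["tristeza"]),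
     ("ansiedad", ["paz"]), ("paz", ["ansiedad"]),
     ("enojo", ["calma"]), ("calma", ["enojo"]),
     ("miedo", ["esperanza"]), ("esperanza", ["miedo", "desesperanza"]),
     ("desesperanza", ["esperanza"])] := by decide

-- truthiness of 'opp & emociones_set': the intersection is nonempty iff some element of s is in l
theorem pvHit (s l : List String) :
    (!(PySem.Set.inter s (PySem.Set.ofList l)).isEmpty) = true ↔ ∃ x ∈ s, x ∈ l := by
  simp [PySem.Set.inter, PySem.Set.contains, PySem.Set.mem_ofList]

theorem pvB_iff (l : List String) : detectar_conflictos_py_alt l = true ↔ pvConf l := by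
  simp only [detectar_conflictos_py_alt, pvConf, List.any_eq_true, pvHit]
  constructor
  · rintro ⟨e, he, hx⟩
    simp only [pvOpp_eq, PySem.Dict.getD, PySem.Dict.get?_mk_cons, beq_iff_eq] at hx
    split_ifs at hx <;> simp_all [PySem.Dict.get?]
  · rintro (⟨h1, h2⟩ | ⟨h1, h2⟩ | ⟨h1, h2⟩ | ⟨h1, h2⟩ | ⟨h1, h2⟩)
    · exact ⟨"tristeza", h1, by simpa [pvOpp_eq, PySem.Dict.getD, PySem.Dict.get?_mk_cons] using h2⟩
    · exact ⟨"ansiedad", h1, by simpa [pvOpp_eq, PySem.Dict.getD, PySem.Dict.get?_mk_cons] using h2⟩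
    · exact ⟨"enojo", h1, by simpa [pvOpp_eq, PySem.Dict.getD, PySem.Dict.get?_mk_cons] using h2⟩
    · exact ⟨"miedo", h1, by simpa [pvOpp_eq, PySem.Dict.getD, PySem.Dict.get?_mk_cons] using h2⟩
    · exact ⟨"desesperanza", h1, by simpa [pvOpp_eq, PySem.Dict.getD, PySem.Dict.get?_mk_cons] using h2⟩

-- ===== VERDICT (by name: the statement is the Claim_ definition above) =====
theorem detectar_conflictos_py_spec : Claim_equal_detectar_conflictos_py := by
  intro l _
  unfold Spec_detectar_conflictos_py
  have := (pvA_iff l).trans (pvB_iff l).symm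
  cases hA : detectar_conflictos_py l <;> cases hB : detectar_conflictos_py_alt l <;>
    simp_all
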